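-- pv_equiv track=rewrite | github.com/jimgeisler/footskill | output.py | gamesTogetherDict
-- ===== SOURCE A (Python) =====
-- def gamesTogetherDict(mates, all_players):
-- 	for player_name in all_players:
-- 		mate_entry = {}
-- 		if player_name in mates:
-- 			mate_entry = mates[player_name]
-- 		for teammate_name in all_players:
-- 			player_entry = 1
-- 			if teammate_name in mate_entry:
-- 				player_entry = mate_entry[teammate_name] + 1
-- 			mate_entry[teammate_name] = player_entry
-- 		mates[player_name] = mate_entry
-- 	return mates
-- ===== SOURCE B (Python) =====
-- def gamesTogetherDict(mates, all_players):
--     cnt = {}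
--     for t in all_players:
--         cnt[t] = cnt.get(t, 0) + 1
--
--     def merged(entry, k):
--         out = dict(entry)
--         for t, c in cnt.items():
--             out[t] = out.get(t, 0) + k * c
--         return out
--
--     result = {}
--     for name, entry in mates.items():
--         k = cnt.get(name, 0)
--         result[name] = merged(entry, k) if k else entry
--     for t, c in cnt.items():
--         if t not in result:
--             result[t] = merged({}, c)
--     return result
-- ===== Notes on version B (the rewrite author's own statement) =====
-- stated objective: alternative
-- what changed: B replaces A's nested per-occurrence loop by a closed-form construction: it builds a frequency table of all_players once, then computes each player's final entry directly as old.get(t,0) + count(player)*count(t) in one pass over mates plus one pass over the distinct players, instead of A's quadratic rescan that increments one occurrence at a time.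
import Mathlib
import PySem

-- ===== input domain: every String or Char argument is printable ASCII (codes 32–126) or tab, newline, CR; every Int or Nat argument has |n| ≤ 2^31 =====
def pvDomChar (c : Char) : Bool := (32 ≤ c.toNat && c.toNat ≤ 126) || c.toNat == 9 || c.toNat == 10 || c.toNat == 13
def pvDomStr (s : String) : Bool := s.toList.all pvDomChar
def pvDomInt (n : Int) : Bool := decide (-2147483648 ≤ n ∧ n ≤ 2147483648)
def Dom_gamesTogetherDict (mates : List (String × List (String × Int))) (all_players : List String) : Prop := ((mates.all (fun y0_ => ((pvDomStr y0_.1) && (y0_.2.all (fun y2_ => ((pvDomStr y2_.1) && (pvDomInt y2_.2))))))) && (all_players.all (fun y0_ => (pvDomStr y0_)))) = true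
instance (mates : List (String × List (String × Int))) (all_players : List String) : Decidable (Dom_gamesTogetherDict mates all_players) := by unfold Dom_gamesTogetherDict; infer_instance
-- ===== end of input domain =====

-- B computes the result in closed form (k occurrences of a player add k*count(t) to teammate t)
-- from a frequency table built once, instead of A's nested per-occurrence rescan.
-- A mutates the `mates` dict in place in Python; the equivalence proved here is about the RETURN value.

-- shared modelling of the Python dict-of-dicts argument / result (dict = insertion-ordered assoc list)
def pvToDicts (mates : List (String × List (String × Int))) : PySem.Dict String (PySem.Dict String Int) :=
  PySem.Dict.ofList (mates.map fun p => (p.1, PySem.Dict.ofList p.2))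

def pvFromDicts (m : PySem.Dict String (PySem.Dict String Int)) : List (String × List (String × Int)) :=
  m.items.map fun p => (p.1, p.2.items)

-- ===== PORT A =====
def gamesTogetherDict (mates : List (String × List (String × Int))) (all_players : List String) : List (String × List (String × Int)) :=
  let m0 := pvToDicts mates
  let mfin := all_players.foldl (fun m player_name =>
    -- mate_entry = {} ; if player_name in mates: mate_entry = mates[player_name]
    let mate_entry0 := if m.contains player_name then m.getD player_name PySem.Dict.empty else PySem.Dict.empty
    -- for teammate_name in all_players: player_entry = 1; if teammate_name in mate_entry: player_entry = mate_entry[teammate_name] + 1; mate_entry[teammate_name] = player_entry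
    let mate_entry := all_players.foldl (fun e teammate_name =>
      e.insert teammate_name (if e.contains teammate_name then e.getD teammate_name 0 + 1 else 1)) mate_entry0
    m.insert player_name mate_entry) m0
  pvFromDicts mfin

-- ===== PORT B =====
def gamesTogetherDict_alt (mates : List (String × List (String × Int))) (all_players : List String) : List (String × List (String × Int)) :=
  let m0 := pvToDicts mates
  -- cnt = {}; for t in all_players: cnt[t] = cnt.get(t, 0) + 1
  let cnt := all_players.foldl (fun d t => d.insert t (d.getD t 0 + 1)) PySem.Dict.empty
  -- def merged(entry, k): out = dict(entry); for t, c in cnt.items(): out[t] = out.get(t, 0) + k * c; return out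
  let merged : PySem.Dict String Int → Int → PySem.Dict String Int := fun entry k =>
    cnt.items.foldl (fun out tc => out.insert tc.1 (out.getD tc.1 0 + k * tc.2)) entry
  -- result = {}; for name, entry in mates.items(): k = cnt.get(name, 0); result[name] = merged(entry, k) if k else entry
  let result := m0.items.foldl (fun r p =>
    let k := cnt.getD p.1 0
    r.insert p.1 (if k ≠ 0 then merged p.2 k else p.2)) PySem.Dict.empty
  -- for t, c in cnt.items(): if t not in result: result[t] = merged({}, c)
  let result := cnt.items.foldl (fun r tc =>
    if r.contains tc.1 then r else r.insert tc.1 (merged PySem.Dict.empty tc.2)) result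
  pvFromDicts result

-- ===== PRECONDITION & SPEC =====
def Spec_gamesTogetherDict (mates : List (String × List (String × Int))) (all_players : List String) (out : List (String × List (String × Int))) : Prop := out = gamesTogetherDict_alt mates all_players
instance (mates : List (String × List (String × Int))) (all_players : List String) (out : List (String × List (String × Int))) : Decidable (Spec_gamesTogetherDict mates all_players out) := by unfold Spec_gamesTogetherDict; infer_instance

-- ===== CLAIM (what is proved, stated in full; the proofs are below) =====
def Claim_equal_gamesTogetherDict : Prop := ∀ (mates : List (String × List (String × Int))) (all_players : List String), Dom_gamesTogetherDict mates all_players → Spec_gamesTogetherDict mates all_players (gamesTogetherDict mates all_players)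

-- ===== LEMMAS AND PROOFS =====

-- abbreviation used only by the proofs: one merge sweep of Counter(xs) into e (what A's inner loop amounts to)
def pvMerge (xs : List String) (e : PySem.Dict String Int) : PySem.Dict String Int :=
  (PySem.Dict.counter xs).items.foldl (fun e tc => e.insert tc.1 (e.getD tc.1 0 + tc.2)) e

-- k merge sweeps in closed form: each teammate t gains k * count(t)
def pvMval (xs : List String) (k : Nat) (e : PySem.Dict String Int) : PySem.Dict String Int :=
  if k = 0 then e
  else (PySem.Dict.counter xs).items.foldl (fun e tc => e.insert tc.1 (e.getD tc.1 0 + (k : Int) * tc.2)) e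

-- the explicit items list both ports' results are shown to equal
def pvSpecItems (xs : List String) (m : PySem.Dict String (PySem.Dict String Int)) (ps : List String) :
    List (String × PySem.Dict String Int) :=
  m.items.map (fun q => (q.1, pvMval xs (ps.count q.1) q.2)) ++
    ((PySem.Set.ofList ps).filter (fun t => !(m.contains t))).map (fun t => (t, pvMval xs (ps.count t) PySem.Dict.empty))

-- A's branch `1 / mate_entry[t]+1` is just `get(t,0)+1`
theorem pv_innerA_step (e : PySem.Dict String Int) (t : String) :
    e.insert t (if e.contains t then e.getD t 0 + 1 else 1) = e.insert t (e.getD t 0 + 1) := by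
  cases h : e.contains t with
  | false =>
    rw [if_neg (by simp), PySem.Dict.getD_of_not_contains e 0 h]
    norm_num
  | true => rw [if_pos (by simp)]

-- a Nodup list filtered for equality with v
theorem pv_filter_beq_of_nodup (l : List String) (v : String) (h : l.Nodup) :
    l.filter (fun k => k == v) = if v ∈ l then [v] else [] := by
  induction l with
  | nil => simp
  | cons a l ih =>
    rcases List.nodup_cons.mp h with ⟨ha, hl⟩
    by_cases hav : a = v
    · subst hav
      simp [ih hl, ha]
    · simp [hav, ih hl, Ne.symm hav]

-- value of an increment-merge fold at one key
theorem pv_getD_foldl_pairs (f : String × Int → Int) (ps : List (String × Int)) (d : PySem.Dict String Int) (v : String) :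
    (ps.foldl (fun e tc => e.insert tc.1 (e.getD tc.1 0 + f tc)) d).getD v 0
      = d.getD v 0 + ((ps.filter (fun p => p.1 == v)).map f).sum := by
  induction ps generalizing d with
  | nil => simp
  | cons p ps ih =>
    rw [List.foldl_cons, ih, PySem.Dict.getD_insert, List.filter_cons]
    by_cases h : v = p.1
    · subst h
      simp
      omega
    · rw [if_neg h]
      have h2 : ¬ p.1 = v := fun hh => h hh.symm
      simp [h2]

-- Set.update is idempotent
theorem pv_update_idem (s : List String) (xs : List String) :
    PySem.Set.update (PySem.Set.update s xs) xs = PySem.Set.update s xs := by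
  rw [PySem.Set.update_eq_append_filter (PySem.Set.update s xs) xs]
  have h : ((PySem.Set.ofList xs).filter (fun y => !(PySem.Set.contains (PySem.Set.update s xs) y))) = [] := by
    apply List.filter_eq_nil_iff.mpr
    intro y hy
    simp
    exact fun _ => (PySem.Set.mem_ofList xs y).mp hy
  rw [h, List.append_nil]

-- two successive increment-merge sweeps over the same pair list compose pointwise
theorem pv_merge_comp (l : List (String × Int))
    (f g : String × Int → Int) (e : PySem.Dict String Int) (he : e.keys.Nodup) :
    l.foldl (fun e tc => e.insert tc.1 (e.getD tc.1 0 + f tc))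
      (l.foldl (fun e tc => e.insert tc.1 (e.getD tc.1 0 + g tc)) e)
      = l.foldl (fun e tc => e.insert tc.1 (e.getD tc.1 0 + (g tc + f tc))) e := by
  have hG : (l.foldl (fun e tc => e.insert tc.1 (e.getD tc.1 0 + g tc)) e).keys.Nodup :=
    PySem.Dict.nodup_keys_foldl_insert_key _ Prod.fst _ e he
  have hL : (l.foldl (fun e tc => e.insert tc.1 (e.getD tc.1 0 + f tc))
      (l.foldl (fun e tc => e.insert tc.1 (e.getD tc.1 0 + g tc)) e)).keys.Nodup :=
    PySem.Dict.nodup_keys_foldl_insert_key _ Prod.fst _ _ hG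
  have hR : (l.foldl (fun e tc => e.insert tc.1 (e.getD tc.1 0 + (g tc + f tc))) e).keys.Nodup :=
    PySem.Dict.nodup_keys_foldl_insert_key _ Prod.fst _ e he
  apply PySem.Dict.ext
  rw [PySem.Dict.items_eq_map_keys _ hL 0, PySem.Dict.items_eq_map_keys _ hR 0]
  have hkeys : (l.foldl (fun e tc => e.insert tc.1 (e.getD tc.1 0 + f tc))
      (l.foldl (fun e tc => e.insert tc.1 (e.getD tc.1 0 + g tc)) e)).keys
      = (l.foldl (fun e tc => e.insert tc.1 (e.getD tc.1 0 + (g tc + f tc))) e).keys := by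
    rw [PySem.Dict.keys_foldl_insert_key, PySem.Dict.keys_foldl_insert_key,
      PySem.Dict.keys_foldl_insert_key, pv_update_idem]
  rw [← hkeys]
  apply List.map_congr_left
  intro k _
  rw [pv_getD_foldl_pairs, pv_getD_foldl_pairs, pv_getD_foldl_pairs,
    PySem.List.sum_map_add_int]
  ring_nf

-- one more merge sweep after k sweeps is k+1 sweeps
theorem pv_mval_succ (xs : List String) (k : Nat) (e : PySem.Dict String Int) (he : e.keys.Nodup) :
    pvMval xs k (pvMerge xs e) = pvMval xs (k + 1) e := by
  unfold pvMval pvMerge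
  rcases Nat.eq_zero_or_pos k with hk | hk
  · subst hk
    rw [if_pos rfl, if_neg (by omega)]
    congr 1
    funext out tc
    norm_num
  · rw [if_neg (by omega), if_neg (by omega)]
    rw [pv_merge_comp _ (fun tc => (k : Int) * tc.2) (fun tc => tc.2) e he]
    congr 1
    funext out tc
    push_cast
    ring_nf

-- merging keeps keys Nodup
theorem pv_merge_nodup (xs : List String) (e : PySem.Dict String Int) (he : e.keys.Nodup) :
    (pvMerge xs e).keys.Nodup := by
  unfold pvMerge
  exact PySem.Dict.nodup_keys_foldl_insert_key _ Prod.fst _ e he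

-- the inner A loop over xs is one merge sweep of Counter(xs)  (entry keys Nodup)
theorem pv_inner_eq (xs : List String) (d : PySem.Dict String Int) (hd : d.keys.Nodup) :
    xs.foldl (fun e t => e.insert t (if e.contains t then e.getD t 0 + 1 else 1)) d = pvMerge xs d := by
  unfold pvMerge
  have hstep : (fun (e : PySem.Dict String Int) (t : String) =>
      e.insert t (if e.contains t then e.getD t 0 + 1 else 1))
      = fun e t => e.insert t (e.getD t 0 + 1) := by
    funext e t; exact pv_innerA_step e t
  rw [hstep]
  have hA : (xs.foldl (fun e t => e.insert t (e.getD t 0 + 1)) d).keys.Nodup :=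
    PySem.Dict.nodup_keys_foldl_insert xs _ d hd
  have hB : ((PySem.Dict.counter xs).items.foldl
      (fun e tc => e.insert tc.1 (e.getD tc.1 0 + tc.2)) d).keys.Nodup :=
    PySem.Dict.nodup_keys_foldl_insert_key _ Prod.fst _ d hd
  apply PySem.Dict.ext
  rw [PySem.Dict.items_eq_map_keys _ hA 0, PySem.Dict.items_eq_map_keys _ hB 0]
  have hkeys : (xs.foldl (fun e t => e.insert t (e.getD t 0 + 1)) d).keys
      = ((PySem.Dict.counter xs).items.foldl
          (fun e tc => e.insert tc.1 (e.getD tc.1 0 + tc.2)) d).keys := by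
    rw [PySem.Dict.keys_foldl_insert, PySem.Dict.keys_foldl_insert_key]
    have : (PySem.Dict.counter xs).items.map Prod.fst = PySem.Set.ofList xs := by
      rw [PySem.Dict.items_counter]
      simp [List.map_map, Function.comp_def]
    rw [this, PySem.Set.update_eq_append_filter, PySem.Set.update_eq_append_filter,
      PySem.Set.ofList_ofList]
  rw [← hkeys]
  apply List.map_congr_left
  intro k _
  have hAv := PySem.Dict.getD_foldl_insert_add_one xs d k
  have hBv := pv_getD_foldl_pairs (fun tc => tc.2) (PySem.Dict.counter xs).items d k
  rw [hAv, hBv, PySem.Dict.items_counter]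
  have hfm : (((PySem.Set.ofList xs).map (fun k => (k, (xs.count k : Int)))).filter
      (fun p => p.1 == k)).map (fun tc => tc.2)
      = ((PySem.Set.ofList xs).filter (fun j => j == k)).map (fun j => (xs.count j : Int)) := by
    rw [List.filter_map, List.map_map]
    rfl
  rw [hfm, pv_filter_beq_of_nodup _ k (PySem.Set.nodup_ofList xs)]
  by_cases hk : k ∈ xs
  · simp [PySem.Set.mem_ofList, hk]
  · simp [PySem.Set.mem_ofList, hk, List.count_eq_zero.mpr hk]

-- A's literal outer loop is the clean merge-sweep fold (entries keep Nodup keys)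
theorem pv_outer_eq (xs : List String) (ps : List String)
    (m : PySem.Dict String (PySem.Dict String Int))
    (hm : ∀ p ∈ m.items, p.2.keys.Nodup) :
    ps.foldl (fun m player =>
        m.insert player (xs.foldl (fun e t =>
            e.insert t (if e.contains t then e.getD t 0 + 1 else 1))
          (if m.contains player then m.getD player PySem.Dict.empty else PySem.Dict.empty))) m
      = ps.foldl (fun m player => m.insert player (pvMerge xs (m.getD player PySem.Dict.empty))) m := by
  induction ps generalizing m with
  | nil => rfl
  | cons player ps ih =>
    rw [List.foldl_cons, List.foldl_cons]
    have hseed : (if m.contains player then m.getD player PySem.Dict.empty else PySem.Dict.empty)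
        = m.getD player PySem.Dict.empty := by
      cases h : m.contains player with
      | false => rw [if_neg (by simp), PySem.Dict.getD_of_not_contains m _ h]
      | true => rw [if_pos (by simp)]
    have hseednd : (m.getD player PySem.Dict.empty).keys.Nodup := by
      cases h : m.get? player with
      | none =>
        rw [PySem.Dict.getD_eq_get?_getD, h]
        simp [PySem.Dict.keys_empty]
      | some v =>
        rw [PySem.Dict.getD_eq_get?_getD, h]
        exact hm (player, v) (PySem.Dict.mem_items_of_get?_eq_some m h)
    have hentry := pv_inner_eq xs (m.getD player PySem.Dict.empty) hseednd
    rw [hseed, hentry]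
    apply ih
    intro p hp
    rcases (PySem.Dict.mem_items_insert _ _ _ p).mp hp with h1 | h1
    · rw [h1]
      exact pv_merge_nodup xs _ hseednd
    · exact hm p h1.1

-- filter over ofList ps with the inserted key removed
theorem pv_filter_insert (ps : List String) (m : PySem.Dict String (PySem.Dict String Int))
    (p : String) (E : PySem.Dict String Int) :
    (PySem.Set.ofList ps).filter (fun t => !((m.insert p E).contains t))
      = ((PySem.Set.ofList ps).discard p).filter (fun t => !(m.contains t)) := by
  simp only [PySem.Set.discard, List.filter_filter]
  apply List.filter_congr
  intro t _
  rw [PySem.Dict.contains_insert]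
  simp [Bool.not_or, Bool.and_comm]

-- the new-key tail ignores the extra head occurrence
theorem pv_map_count_tail (xs ps : List String) (p : String) (L : List String)
    (hL : ∀ t ∈ L, t ≠ p) :
    L.map (fun t => (t, pvMval xs (ps.count t) PySem.Dict.empty))
      = L.map (fun t => (t, pvMval xs ((p :: ps).count t) PySem.Dict.empty)) := by
  apply List.map_congr_left
  intro t ht
  rw [List.count_cons_of_ne (fun h => (hL t ht) h.symm)]

-- one outer step shifts the closed-form list from ps to p :: ps
theorem pv_spec_step (xs ps : List String) (p : String)
    (m : PySem.Dict String (PySem.Dict String Int)) (hm : m.keys.Nodup)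
    (hv : ∀ q ∈ m.items, q.2.keys.Nodup) :
    pvSpecItems xs (m.insert p (pvMerge xs (m.getD p PySem.Dict.empty))) ps
      = pvSpecItems xs m (p :: ps) := by
  unfold pvSpecItems
  cases hc : m.contains p with
  | true =>
    rw [PySem.Dict.items_insert_of_contains m _ hc, List.map_map]
    have h1 : m.items.map ((fun q => (q.1, pvMval xs (ps.count q.1) q.2)) ∘
        (fun q => if (q.1 == p) = true then (p, pvMerge xs (m.getD p PySem.Dict.empty)) else q))
        = m.items.map (fun q => (q.1, pvMval xs ((p :: ps).count q.1) q.2)) := by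
      apply List.map_congr_left
      intro q hq
      simp only [Function.comp_apply]
      by_cases hqp : q.1 = p
      · rw [if_pos (by simp [hqp])]
        have hq' : (p, q.2) ∈ m.items := by
          have : q = (p, q.2) := by rw [← hqp]
          exact this ▸ hq
        have hq2 : m.getD p PySem.Dict.empty = q.2 :=
          PySem.Dict.getD_of_mem_items m hq' hm _
        rw [hq2, pv_mval_succ xs _ _ (hv q hq), hqp, List.count_cons_self]
      · rw [if_neg (by simp [hqp]), List.count_cons_of_ne (fun h => hqp h.symm)]
    have hfil := pv_filter_insert ps m p (pvMerge xs (m.getD p PySem.Dict.empty))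
    have hfil2 : (PySem.Set.ofList (p :: ps)).filter (fun t => !(m.contains t))
        = ((PySem.Set.ofList ps).discard p).filter (fun t => !(m.contains t)) := by
      rw [PySem.Set.ofList_cons, List.filter_cons]
      simp [hc]
    have h2 : (((PySem.Set.ofList ps).discard p).filter (fun t => !(m.contains t))).map
          (fun t => (t, pvMval xs (ps.count t) PySem.Dict.empty))
        = (((PySem.Set.ofList ps).discard p).filter (fun t => !(m.contains t))).map
          (fun t => (t, pvMval xs ((p :: ps).count t) PySem.Dict.empty)) := by
      apply pv_map_count_tail
      intro t ht
      have := List.mem_of_mem_filter ht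
      exact ((PySem.Set.mem_discard _ p t).mp this).2
    rw [h1, hfil, hfil2, h2]
  | false =>
    rw [PySem.Dict.items_insert_of_not_contains m _ hc, PySem.Dict.getD_of_not_contains m _ hc,
      List.map_append]
    have h1 : m.items.map (fun q => (q.1, pvMval xs (ps.count q.1) q.2))
        = m.items.map (fun q => (q.1, pvMval xs ((p :: ps).count q.1) q.2)) := by
      apply List.map_congr_left
      intro q hq
      have hqp : q.1 ≠ p := by
        intro h
        have : m.contains q.1 = true :=
          (PySem.Dict.contains_iff_mem_keys m q.1).mpr (PySem.Dict.mem_keys_of_mem_items m hq)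
        rw [h] at this
        exact absurd this (by simp [hc])
      rw [List.count_cons_of_ne (fun h => hqp h.symm)]
    have hfil := pv_filter_insert ps m p (pvMerge xs PySem.Dict.empty)
    have hfil2 : (PySem.Set.ofList (p :: ps)).filter (fun t => !(m.contains t))
        = p :: ((PySem.Set.ofList ps).discard p).filter (fun t => !(m.contains t)) := by
      rw [PySem.Set.ofList_cons, List.filter_cons]
      simp [hc]
    have h2 : (((PySem.Set.ofList ps).discard p).filter (fun t => !(m.contains t))).map
          (fun t => (t, pvMval xs (ps.count t) PySem.Dict.empty))
        = (((PySem.Set.ofList ps).discard p).filter (fun t => !(m.contains t))).map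
          (fun t => (t, pvMval xs ((p :: ps).count t) PySem.Dict.empty)) := by
      apply pv_map_count_tail
      intro t ht
      have := List.mem_of_mem_filter ht
      exact ((PySem.Set.mem_discard _ p t).mp this).2
    have hhead : pvMval xs (ps.count p) (pvMerge xs PySem.Dict.empty)
        = pvMval xs ((p :: ps).count p) PySem.Dict.empty := by
      rw [pv_mval_succ xs _ _ PySem.Dict.nodup_keys_empty, List.count_cons_self]
    rw [h1, hfil, hfil2, h2, List.map_cons, hhead]
    simp

-- the clean outer fold, characterised: its items are the closed-form list pvSpecItems
theorem pv_A_items (xs : List String) (ps : List String)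
    (m : PySem.Dict String (PySem.Dict String Int)) (hm : m.keys.Nodup)
    (hv : ∀ p ∈ m.items, p.2.keys.Nodup) :
    (ps.foldl (fun m player => m.insert player (pvMerge xs (m.getD player PySem.Dict.empty))) m).items
      = pvSpecItems xs m ps := by
  revert hm hv
  induction ps generalizing m with
  | nil =>
    intro hm hv
    unfold pvSpecItems
    simp [pvMval]
  | cons p ps ih =>
    intro hm hv
    rw [List.foldl_cons]
    have hseednd : (m.getD p PySem.Dict.empty).keys.Nodup := by
      cases h : m.get? p with
      | none =>
        rw [PySem.Dict.getD_eq_get?_getD, h]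
        simp [PySem.Dict.keys_empty]
      | some v =>
        rw [PySem.Dict.getD_eq_get?_getD, h]
        exact hv (p, v) (PySem.Dict.mem_items_of_get?_eq_some m h)
    have hv' : ∀ q ∈ (m.insert p (pvMerge xs (m.getD p PySem.Dict.empty))).items, q.2.keys.Nodup := by
      intro q hq
      rcases (PySem.Dict.mem_items_insert _ _ _ q).mp hq with h1 | h1
      · rw [h1]
        exact pv_merge_nodup xs _ hseednd
      · exact hv q h1.1
    rw [ih _ (PySem.Dict.nodup_keys_insert m p _ hm) hv']
    exact pv_spec_step xs ps p m hm hv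

-- skip-fold: inserting only fresh keys appends exactly the filtered tail
theorem pv_skip_fold (l : List (String × Int)) (hl : (l.map Prod.fst).Nodup)
    (v : String × Int → PySem.Dict String Int) (r : PySem.Dict String (PySem.Dict String Int)) :
    (l.foldl (fun r tc => if r.contains tc.1 then r else r.insert tc.1 (v tc)) r).items
      = r.items ++ (l.filter (fun tc => !(r.contains tc.1))).map (fun tc => (tc.1, v tc)) := by
  revert hl
  induction l generalizing r with
  | nil => intro _; simp
  | cons tc l ih =>
    intro hl
    rw [List.map_cons, List.nodup_cons] at hl
    rw [List.foldl_cons, List.filter_cons]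
    cases hc : r.contains tc.1 with
    | true =>
      simp only [Bool.not_true, if_true, Bool.false_eq_true, if_false]
      exact ih r hl.2
    | false =>
      simp only [Bool.not_false, Bool.false_eq_true, if_false, if_true]
      rw [ih _ hl.2, PySem.Dict.items_insert_of_not_contains r (v tc) hc]
      have hfc : l.filter (fun tc' => !((r.insert tc.1 (v tc)).contains tc'.1))
          = l.filter (fun tc' => !(r.contains tc'.1)) := by
        apply List.filter_congr
        intro tc' htc'
        have hne : tc'.1 ≠ tc.1 := by
          intro h
          exact hl.1 (h ▸ List.mem_map_of_mem htc')
        rw [PySem.Dict.contains_insert]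
        simp [hne]
      rw [hfc]
      simp

-- every value stored by a dict-building insert fold came from the seed dict or the pair list
theorem pv_mem_items_foldl_insert_pairs (l : List (String × PySem.Dict String Int))
    (d : PySem.Dict String (PySem.Dict String Int)) (p : String × PySem.Dict String Int)
    (hp : p ∈ (l.foldl (fun acc q => acc.insert q.1 q.2) d).items) :
    p ∈ d.items ∨ p.2 ∈ l.map Prod.snd := by
  induction l generalizing d with
  | nil => exact Or.inl hp
  | cons q l ih =>
    rcases ih (d.insert q.1 q.2) hp with h | h
    · rcases (PySem.Dict.mem_items_insert d q.1 q.2 p).mp h with h1 | h1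
      · right; simp [h1]
      · exact Or.inl h1.1
    · right; simp [h]

-- all value dicts of the modelled input have Nodup keys
theorem pv_inv_toDicts (mates : List (String × List (String × Int)))
    (p : String × PySem.Dict String Int) (hp : p ∈ (pvToDicts mates).items) :
    p.2.keys.Nodup := by
  have hp' : p ∈ ((mates.map fun q => (q.1, PySem.Dict.ofList q.2)).foldl
      (fun acc q => acc.insert q.1 q.2) PySem.Dict.empty).items := hp
  rcases pv_mem_items_foldl_insert_pairs _ _ p hp' with h | h
  · simp [PySem.Dict.empty] at h
  · simp only [List.map_map, List.mem_map, Function.comp_def] at h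
    rcases h with ⟨q, _, hq⟩
    rw [← hq]
    exact PySem.Dict.nodup_keys_ofList q.2

-- B's construction, characterised: its items are the same closed-form list
theorem pv_B_items (xs : List String) (m : PySem.Dict String (PySem.Dict String Int)) (hm : m.keys.Nodup) :
    ((PySem.Dict.counter xs).items.foldl (fun r tc =>
        if r.contains tc.1 then r
        else r.insert tc.1 ((PySem.Dict.counter xs).items.foldl
          (fun out sc => out.insert sc.1 (out.getD sc.1 0 + tc.2 * sc.2)) PySem.Dict.empty))
      (m.items.foldl (fun r p =>
        r.insert p.1 (if (PySem.Dict.counter xs).getD p.1 0 ≠ 0 then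
            (PySem.Dict.counter xs).items.foldl
              (fun out sc => out.insert sc.1 (out.getD sc.1 0 + (PySem.Dict.counter xs).getD p.1 0 * sc.2)) p.2
          else p.2)) PySem.Dict.empty)).items = pvSpecItems xs m xs := by
  have hm' : (List.map (fun p => p.1) (m.items : List (String × PySem.Dict String Int))).Nodup := by
    simpa [PySem.Dict.keys] using hm
  have hfst : (PySem.Dict.counter xs).items.map Prod.fst = PySem.Set.ofList xs := by
    rw [PySem.Dict.items_counter]
    simp [List.map_map, Function.comp_def]
  have hcntfst : ((PySem.Dict.counter xs).items.map Prod.fst).Nodup := by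
    rw [hfst]; exact PySem.Set.nodup_ofList xs
  have hfresh : ∀ p ∈ (m.items : List (String × PySem.Dict String Int)),
      (PySem.Dict.empty : PySem.Dict String (PySem.Dict String Int)).contains p.1 = false :=
    fun p _ => PySem.Dict.contains_empty p.1
  have hr1items : (m.items.foldl (fun r p =>
        r.insert p.1 (if (PySem.Dict.counter xs).getD p.1 0 ≠ 0 then
            (PySem.Dict.counter xs).items.foldl
              (fun out sc => out.insert sc.1 (out.getD sc.1 0 + (PySem.Dict.counter xs).getD p.1 0 * sc.2)) p.2
          else p.2)) PySem.Dict.empty).items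
      = m.items.map (fun p => (p.1, if (PySem.Dict.counter xs).getD p.1 0 ≠ 0 then
            (PySem.Dict.counter xs).items.foldl
              (fun out sc => out.insert sc.1 (out.getD sc.1 0 + (PySem.Dict.counter xs).getD p.1 0 * sc.2)) p.2
          else p.2)) := by
    rw [PySem.Dict.items_foldl_insert_fresh m.items (fun p => p.1) _ PySem.Dict.empty hfresh hm']
    rfl
  have hr1keys : (m.items.foldl (fun r p =>
        r.insert p.1 (if (PySem.Dict.counter xs).getD p.1 0 ≠ 0 then
            (PySem.Dict.counter xs).items.foldl
              (fun out sc => out.insert sc.1 (out.getD sc.1 0 + (PySem.Dict.counter xs).getD p.1 0 * sc.2)) p.2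
          else p.2)) PySem.Dict.empty).keys = m.keys := by
    rw [PySem.Dict.keys_foldl_insert_key, PySem.Dict.keys_empty, PySem.Set.update_nil_left,
      PySem.Set.ofList_eq_self_of_nodup _ hm']
    rfl
  rw [pv_skip_fold _ hcntfst _ _, hr1items]
  have hpred : (fun (tc : String × Int) => !((m.items.foldl (fun r p =>
        r.insert p.1 (if (PySem.Dict.counter xs).getD p.1 0 ≠ 0 then
            (PySem.Dict.counter xs).items.foldl
              (fun out sc => out.insert sc.1 (out.getD sc.1 0 + (PySem.Dict.counter xs).getD p.1 0 * sc.2)) p.2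
          else p.2)) PySem.Dict.empty).contains tc.1))
      = fun tc => !(m.contains tc.1) := by
    funext tc
    rw [PySem.Dict.contains_eq_decide_mem_keys, hr1keys, ← PySem.Dict.contains_eq_decide_mem_keys]
  rw [hpred]
  unfold pvSpecItems
  have hseg1 : m.items.map (fun p => (p.1, if (PySem.Dict.counter xs).getD p.1 0 ≠ 0 then
            (PySem.Dict.counter xs).items.foldl
              (fun out sc => out.insert sc.1 (out.getD sc.1 0 + (PySem.Dict.counter xs).getD p.1 0 * sc.2)) p.2
          else p.2))
      = m.items.map (fun q => (q.1, pvMval xs (xs.count q.1) q.2)) := by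
    apply List.map_congr_left
    intro q _
    by_cases h0 : xs.count q.1 = 0
    · rw [PySem.Dict.getD_counter, if_neg (by simp [h0]), pvMval, if_pos h0]
    · rw [PySem.Dict.getD_counter, if_pos (by exact_mod_cast h0)]
      rw [pvMval, if_neg h0]
  have hseg2 : ((PySem.Dict.counter xs).items.filter (fun tc => !(m.contains tc.1))).map
        (fun tc => (tc.1, (PySem.Dict.counter xs).items.foldl
          (fun out sc => out.insert sc.1 (out.getD sc.1 0 + tc.2 * sc.2)) PySem.Dict.empty))
      = ((PySem.Set.ofList xs).filter (fun t => !(m.contains t))).map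
          (fun t => (t, pvMval xs (xs.count t) PySem.Dict.empty)) := by
    rw [PySem.Dict.items_counter, List.filter_map, List.map_map]
    apply List.map_congr_left
    intro t ht
    have htx : t ∈ xs := by
      have := List.mem_of_mem_filter ht
      exact (PySem.Set.mem_ofList xs t).mp this
    have h0 : xs.count t ≠ 0 := fun h => (List.count_eq_zero.mp h) htx
    simp only [Function.comp_apply]
    rw [pvMval, if_neg h0, PySem.Dict.items_counter]
  rw [hseg1, hseg2]

-- ===== VERDICT (by name: the statement is the Claim_ definition above) =====
theorem gamesTogetherDict_spec : Claim_equal_gamesTogetherDict := by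
  intro mates all_players _
  have hkeys : (pvToDicts mates).keys.Nodup := by
    unfold pvToDicts
    exact PySem.Dict.nodup_keys_ofList _
  show gamesTogetherDict mates all_players = gamesTogetherDict_alt mates all_players
  simp only [gamesTogetherDict, gamesTogetherDict_alt]
  rw [PySem.Dict.foldl_insert_getD_add_one_eq_counter]
  unfold pvFromDicts
  congr 1
  rw [pv_outer_eq all_players all_players (pvToDicts mates) (pv_inv_toDicts mates),
    pv_A_items all_players all_players (pvToDicts mates) hkeys (pv_inv_toDicts mates),
    pv_B_items all_players (pvToDicts mates) hkeys]
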